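-- pv_equiv track=rewrite | github.com/ChandruMIT-o/Tournament-of-Strategies-MIT | strategies/veg_biriyani.py | veg_biriyani
-- ===== SOURCE A (Python) =====
-- def veg_biriyani(own, opp):
--     def alternating_booleans(length):
--       true_block = 2
--       false_block = 4
--       result = []
--       cycle = 0
--
--       while len(result) < length:
--
--         result.extend([False] * (false_block + cycle))
--         result.extend([True] * true_block)
--
--       return result[:length]
--     length = len(own)
--
--     return alternating_booleans(length+1)[-1]
-- ===== SOURCE B (Python) =====
-- def veg_biriyani(own, opp):
--     # A's cycle counter never changes, so the loop emits the fixed 6-cycle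
--     # [F,F,F,F,T,T] forever; the element at index len(own) is:
--     return len(own) % 6 >= 4
-- ===== Notes on version B (the rewrite author's own statement) =====
-- stated objective: simpler
-- what changed: Replaces the list-building while loop and slicing with the closed form len(own) % 6 >= 4, since the loop's unchanging cycle counter makes the emitted pattern the fixed 6-cycle [F,F,F,F,T,T].
import Mathlib
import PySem

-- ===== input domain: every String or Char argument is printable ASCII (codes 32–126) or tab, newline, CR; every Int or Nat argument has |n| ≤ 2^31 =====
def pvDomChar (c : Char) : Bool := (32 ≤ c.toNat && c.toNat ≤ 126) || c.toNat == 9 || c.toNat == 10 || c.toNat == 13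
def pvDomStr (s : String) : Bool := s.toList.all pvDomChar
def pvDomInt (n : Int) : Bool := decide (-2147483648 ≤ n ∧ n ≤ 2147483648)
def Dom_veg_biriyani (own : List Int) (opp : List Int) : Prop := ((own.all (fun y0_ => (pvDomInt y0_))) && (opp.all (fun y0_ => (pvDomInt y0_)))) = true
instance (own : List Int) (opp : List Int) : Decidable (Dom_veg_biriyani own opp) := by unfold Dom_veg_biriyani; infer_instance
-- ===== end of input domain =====

-- B replaces A's list-building while loop with the closed form len(own) % 6 >= 4
-- (the loop's cycle counter never changes, so the pattern is the fixed 6-cycle F,F,F,F,T,T).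

-- ===== PORT A =====
-- the while loop of alternating_booleans: extends result by (false_block+cycle) falses
-- and true_block trues until len(result) >= length; cycle is carried (and never changed)
def pvChunkLoop (length : Nat) (result : List Bool) (cycle : Nat) : List Bool :=
  if result.length < length then
    pvChunkLoop length (result ++ List.replicate (4 + cycle) false ++ List.replicate 2 true) cycle
  else result
termination_by length - result.length
decreasing_by simp; omega

-- result[:length] is List.take since length = len(own)+1 is nonnegative (exact there)
def alternating_booleans (length : Nat) : List Bool :=
  (pvChunkLoop length [] 0).take length

def veg_biriyani (own : List Int) (opp : List Int) : Bool :=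
  match PySem.List.pyGet? (alternating_booleans (own.length + 1)) (-1) with
  | some b => b
  | none => false   -- IndexError branch; unreachable since the list has length len(own)+1 ≥ 1

-- ===== PORT B =====
def veg_biriyani_alt (own : List Int) (opp : List Int) : Bool :=
  decide (4 ≤ own.length % 6)

-- ===== PRECONDITION & SPEC =====
def Spec_veg_biriyani (own : List Int) (opp : List Int) (out : Bool) : Prop := out = veg_biriyani_alt own opp
instance (own : List Int) (opp : List Int) (out : Bool) : Decidable (Spec_veg_biriyani own opp out) := by unfold Spec_veg_biriyani; infer_instance

-- ===== CLAIM (what is proved, stated in full; the proofs are below) =====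
def Claim_equal_veg_biriyani : Prop := ∀ (own : List Int) (opp : List Int), Dom_veg_biriyani own opp → Spec_veg_biriyani own opp (veg_biriyani own opp)

-- ===== LEMMAS AND PROOFS =====

-- Invariant of A's loop (with cycle = 0): if result so far is a prefix of the 6-cycle
-- pattern, then the loop's output still is, has length ≥ the target, a multiple of 6.
lemma pvChunkLoop_spec (length : Nat) (result : List Bool)
    (hmod : result.length % 6 = 0)
    (hpat : ∀ i, i < result.length → result[i]? = some (decide (4 ≤ i % 6))) :
    (pvChunkLoop length result 0).length % 6 = 0 ∧
    length ≤ (pvChunkLoop length result 0).length ∧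
    ∀ i, i < (pvChunkLoop length result 0).length →
      (pvChunkLoop length result 0)[i]? = some (decide (4 ≤ i % 6)) := by
  revert hmod hpat
  fun_induction pvChunkLoop length result 0 with
  | case1 result h ih =>
    intro hmod hpat
    apply ih
    · simp; omega
    · intro i hi
      simp only [List.append_assoc]
      rcases Nat.lt_or_ge i result.length with hlt | hge
      · rw [List.getElem?_append_left hlt]; exact hpat i hlt
      · rw [List.getElem?_append_right hge]
        have hi' : i - result.length < 6 := by
          simp at hi; omega
        have hm : i % 6 = i - result.length := by omega
        rw [hm]
        set j := i - result.length with hj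
        interval_cases j <;> simp
  | case2 result h =>
    intro hmod hpat
    exact ⟨hmod, by omega, hpat⟩

lemma veg_biriyani_closed (own : List Int) (opp : List Int) :
    veg_biriyani own opp = decide (4 ≤ own.length % 6) := by
  set n := own.length with hn
  obtain ⟨hmod, hlen, hpat⟩ := pvChunkLoop_spec (n + 1) [] (by simp) (by simp)
  set l := pvChunkLoop (n + 1) [] 0 with hl
  have htake : (l.take (n + 1)).length = n + 1 := by simp; omega
  have hlast : (l.take (n + 1)).getLast? = l[n]? := by
    rw [List.getLast?_eq_getElem?, htake]
    simp
  have hget : l[n]? = some (decide (4 ≤ n % 6)) := hpat n (by omega)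
  unfold veg_biriyani alternating_booleans
  rw [← hn, ← hl, PySem.List.pyGet?_neg_one, hlast, hget]

-- ===== VERDICT (by name: the statement is the Claim_ definition above) =====
theorem veg_biriyani_spec : Claim_equal_veg_biriyani := by
  intro own opp _
  unfold Spec_veg_biriyani veg_biriyani_alt
  exact veg_biriyani_closed own opp
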